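-- pv_equiv track=rewrite | github.com/andreweverman/jarod_display | app.py | separete
-- ===== SOURCE A (Python) =====
-- def separete(data):
--     """ Separates a list of coordinates into a list of list of coordinates by adjacency """
--
--     # create a dict filled with Nones to make loooking up easier
--     record = dict()
--     sorted_data = sorted(data)
--     for x, y in sorted_data:
--         if x in record.keys():
--             record[x][y] = None
--         else:
--             record[x] = dict()
--             record[x][y] = None
--
--     def in_record(x, y):
--         """ returns true if x, y is in record """
--         return x in record.keys() and y in record[x].keys()
--
--     def find_adjacents(x, y):
--         """ find adjacent cells (8 directions) """
--         check = [((x - 1, y - 1), in_record(x - 1, y - 1)),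
--                 ((x + 1, y + 1), in_record(x + 1, y + 1)),
--                 ((x - 1, y + 1), in_record(x - 1, y + 1)),
--                 ((x + 1, y - 1), in_record(x + 1, y - 1)),
--                 ((x - 1, y), in_record(x - 1, y)),
--                 ((x + 1, y), in_record(x + 1, y)),
--                 ((x, y - 1), in_record(x, y - 1)),
--                 ((x, y - 1), in_record(x, y - 1))]
--
--         result = []
--         for coord, found in check:
--             if found:
--                 result.append(coord)
--         return result
--
--     def get_group(cells):
--         """ Returns group id number of first of cells, or None """
--         for x, y in cells:
--             if record[x][y] is not None:
--                 return record[x][y]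
--         return None
--
--
--     # loop over each, assigning a group id
--     group_id = 0
--     for x, y in sorted_data:
--         cells = find_adjacents(x, y)
--         if len(cells) == 0:
--             # no neighbors found, make a new group
--             record[x][y] = group_id
--             group_id += 1
--         else:
--             # found cells
--             found_group = get_group(cells)
--             if found_group is None:
--                 # no neighbors have a group
--                 # give this cell and all neighbors a new group
--                 record[x][y] = group_id
--                 for f_x, f_y in cells:
--                     record[f_x][f_y] = group_id
--                 group_id += 1
--             else:
--                 # found a neighbor in a group
--                 # apply that group to this and all other neighbors
--                 record[x][y] = found_group
--                 for f_x, f_y in cells: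
--                     record[f_x][f_y] = found_group
--
--     result = []
--     for i in range(0, group_id):
--         result.append([])
--         for x, y_dict in record.items():
--             for y, group in y_dict.items():
--                 if group == i:
--                     result[i].append( (x, y) )
--     result = [r for r in result if len(r) != 0]
--     return result
-- ===== SOURCE B (Python) =====
-- def separete(data):
--     """ Separates a list of coordinates into a list of list of coordinates by adjacency """
--     cells_sorted = sorted(data)
--     # flat dict cell -> group id (None while unassigned); insertion order = sorted order
--     label = {}
--     for c in cells_sorted:
--         label[c] = None
--
--     offsets = [(-1, -1), (1, 1), (-1, 1), (1, -1), (-1, 0), (1, 0), (0, -1), (0, -1)]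
--     gid = 0
--     for x, y in cells_sorted:
--         nbrs = [(x + dx, y + dy) for dx, dy in offsets if (x + dx, y + dy) in label]
--         if not nbrs:
--             label[(x, y)] = gid
--             gid += 1
--         else:
--             g = None
--             for c in nbrs:
--                 if label[c] is not None:
--                     g = label[c]
--                     break
--             if g is None:
--                 g = gid
--                 gid += 1
--             label[(x, y)] = g
--             for c in nbrs:
--                 label[c] = g
--
--     # single pass: bucket cells by group id, then emit in id order
--     buckets = {}
--     for c, g in label.items():
--         buckets.setdefault(g, []).append(c)
--     return [buckets[i] for i in range(gid) if i in buckets]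
-- ===== Notes on version B (the rewrite author's own statement) =====
-- stated objective: faster
-- what changed: B keeps the labels in one flat dict keyed by the (x,y) cell instead of A's nested dict-of-dicts, and builds the output by bucketing all cells by group id in a single pass over that dict instead of A's rescan of the whole record once per group id.
import Mathlib
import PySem

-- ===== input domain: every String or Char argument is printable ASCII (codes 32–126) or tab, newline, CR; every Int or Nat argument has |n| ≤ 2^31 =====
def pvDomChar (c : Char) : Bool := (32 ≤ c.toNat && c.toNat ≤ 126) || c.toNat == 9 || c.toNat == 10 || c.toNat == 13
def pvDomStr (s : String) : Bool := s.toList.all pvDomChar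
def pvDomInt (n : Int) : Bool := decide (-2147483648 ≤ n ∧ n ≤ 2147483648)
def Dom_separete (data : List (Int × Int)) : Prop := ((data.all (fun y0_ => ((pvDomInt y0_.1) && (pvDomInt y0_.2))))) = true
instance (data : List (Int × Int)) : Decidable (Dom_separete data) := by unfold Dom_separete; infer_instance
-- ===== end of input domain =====

-- B replaces A's nested dict-of-dicts record by a flat cell-keyed dict and A's
-- per-group rescan of the whole record by one bucketing pass (objective: faster).

-- ===== PORT A =====
-- helpers of A: record is the nested dict x -> (y -> group-or-None)
def pvInRecord (r : PySem.Dict Int (PySem.Dict Int (Option Int))) (x y : Int) : Bool :=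
  r.contains x && (r.getD x PySem.Dict.empty).contains y

-- find_adjacents: the literal 8-entry check table (note A checks (x, y-1) twice and never (x, y+1))
def pvFindAdjacents (r : PySem.Dict Int (PySem.Dict Int (Option Int))) (x y : Int) :
    List (Int × Int) :=
  let check : List ((Int × Int) × Bool) :=
    [((x - 1, y - 1), pvInRecord r (x - 1) (y - 1)),
     ((x + 1, y + 1), pvInRecord r (x + 1) (y + 1)),
     ((x - 1, y + 1), pvInRecord r (x - 1) (y + 1)),
     ((x + 1, y - 1), pvInRecord r (x + 1) (y - 1)),
     ((x - 1, y), pvInRecord r (x - 1) y),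
     ((x + 1, y), pvInRecord r (x + 1) y),
     ((x, y - 1), pvInRecord r x (y - 1)),
     ((x, y - 1), pvInRecord r x (y - 1))]
  check.foldl (fun res q => if q.2 then res ++ [q.1] else res) []

-- get_group: group of the first of cells that has one (cells are always present keys in A)
def pvGetGroup (r : PySem.Dict Int (PySem.Dict Int (Option Int))) :
    List (Int × Int) → Option Int
  | [] => none
  | c :: rest =>
    match (r.getD c.1 PySem.Dict.empty).getD c.2 none with
    | some g => some g
    | none => pvGetGroup r rest

-- record[x][y] = v
def pvSetV (r : PySem.Dict Int (PySem.Dict Int (Option Int))) (x y : Int) (v : Option Int) :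
    PySem.Dict Int (PySem.Dict Int (Option Int)) :=
  r.insert x ((r.getD x PySem.Dict.empty).insert y v)

-- body of A's first loop (fill record with Nones)
def pvBuildStepA (r : PySem.Dict Int (PySem.Dict Int (Option Int))) (p : Int × Int) :
    PySem.Dict Int (PySem.Dict Int (Option Int)) :=
  if r.contains p.1 then r.insert p.1 ((r.getD p.1 PySem.Dict.empty).insert p.2 none)
  else r.insert p.1 (PySem.Dict.empty.insert p.2 none)

-- body of A's group-assignment loop (state = (record, group_id))
def pvStepA (st : PySem.Dict Int (PySem.Dict Int (Option Int)) × Int) (p : Int × Int) :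
    PySem.Dict Int (PySem.Dict Int (Option Int)) × Int :=
  let cells := pvFindAdjacents st.1 p.1 p.2
  if cells.length = 0 then (pvSetV st.1 p.1 p.2 (some st.2), st.2 + 1)
  else
    match pvGetGroup st.1 cells with
    | none =>
      (cells.foldl (fun r c => pvSetV r c.1 c.2 (some st.2)) (pvSetV st.1 p.1 p.2 (some st.2)),
       st.2 + 1)
    | some g =>
      (cells.foldl (fun r c => pvSetV r c.1 c.2 (some g)) (pvSetV st.1 p.1 p.2 (some g)), st.2)

-- A's inner result loop for one group id i: scan the whole record for cells with group i
def pvScanA (r : PySem.Dict Int (PySem.Dict Int (Option Int))) (i : Int) : List (Int × Int) :=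
  r.items.foldl (fun acc q => q.2.items.foldl
    (fun acc2 e => if e.2 == some i then acc2 ++ [(q.1, e.1)] else acc2) acc) []

def separete (data : List (Int × Int)) : List (List (Int × Int)) :=
  let sorted_data := PySem.List.sorted data (fun p => toLex p) false
  let record := sorted_data.foldl pvBuildStepA PySem.Dict.empty
  let st := sorted_data.foldl pvStepA (record, 0)
  let result := (PySem.List.pyRange 0 st.2 1).foldl
    (fun res i => res ++ [pvScanA st.1 i]) []
  result.filter (fun g => g.length != 0)

-- ===== PORT B =====
def pvOffsets : List (Int × Int) :=
  [(-1, -1), (1, 1), (-1, 1), (1, -1), (-1, 0), (1, 0), (0, -1), (0, -1)]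

-- first non-None label among nbrs (B's for/break loop)
def pvFirstGroup (l : PySem.Dict (Int × Int) (Option Int)) :
    List (Int × Int) → Option Int
  | [] => none
  | c :: rest =>
    match l.getD c none with
    | some g => some g
    | none => pvFirstGroup l rest

-- body of B's labelling loop (state = (label, gid))
def pvStepB (st : PySem.Dict (Int × Int) (Option Int) × Int) (p : Int × Int) :
    PySem.Dict (Int × Int) (Option Int) × Int :=
  let nbrs := pvOffsets.filterMap (fun o =>
    if st.1.contains (p.1 + o.1, p.2 + o.2) then some (p.1 + o.1, p.2 + o.2) else none)
  if nbrs.isEmpty then (st.1.insert p (some st.2), st.2 + 1)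
  else
    let gg := match pvFirstGroup st.1 nbrs with
      | none => (st.2, st.2 + 1)
      | some g => (g, st.2)
    (nbrs.foldl (fun l c => l.insert c (some gg.1)) (st.1.insert p (some gg.1)), gg.2)

def separete_alt (data : List (Int × Int)) : List (List (Int × Int)) :=
  let cells_sorted := PySem.List.sorted data (fun p => toLex p) false
  let label := cells_sorted.foldl (fun l c => l.insert c (none : Option Int)) PySem.Dict.empty
  let st := cells_sorted.foldl pvStepB (label, 0)
  let buckets := st.1.items.foldl (fun b q => b.modify q.2 [] (· ++ [q.1])) PySem.Dict.empty
  (PySem.List.pyRange 0 st.2 1).foldl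
    (fun res i =>
      if buckets.contains (some i) then res ++ [buckets.getD (some i) []] else res) []

-- ===== PRECONDITION & SPEC =====
def Spec_separete (data : List (Int × Int)) (out : List (List (Int × Int))) : Prop := out = separete_alt data
instance (data : List (Int × Int)) (out : List (List (Int × Int))) : Decidable (Spec_separete data out) := by unfold Spec_separete; infer_instance

-- ===== CLAIM (what is proved, stated in full; the proofs are below) =====
def Claim_equal_separete : Prop := ∀ (data : List (Int × Int)), Dom_separete data → Spec_separete data (separete data)

-- ===== LEMMAS AND PROOFS =====

def pvFlat (r : PySem.Dict Int (PySem.Dict Int (Option Int))) : List ((Int × Int) × Option Int) :=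
  r.items.flatMap (fun q => q.2.items.map (fun e => ((q.1, e.1), e.2)))

lemma mem_pvFlat {r : PySem.Dict Int (PySem.Dict Int (Option Int))} {p : (Int × Int) × Option Int} :
    p ∈ pvFlat r ↔ ∃ inner, (p.1.1, inner) ∈ r.items ∧ (p.1.2, p.2) ∈ inner.items := by
  simp only [pvFlat, List.mem_flatMap, List.mem_map]
  constructor
  · rintro ⟨⟨a, inner⟩, hq, ⟨b, v⟩, hb, he⟩
    cases p with | mk c w => cases c with | mk cx cy =>
      simp at he
      obtain ⟨⟨h1, h2⟩, h3⟩ := he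
      exact ⟨inner, by simpa [← h1, ← h2, ← h3] using ⟨hq, hb⟩⟩
  · rintro ⟨inner, h1, h2⟩
    exact ⟨(p.1.1, inner), h1, (p.1.2, p.2), h2, rfl⟩

lemma inRecord_iff {r : PySem.Dict Int (PySem.Dict Int (Option Int))} (hnd : r.keys.Nodup)
    (x y : Int) : pvInRecord r x y = true ↔ (x, y) ∈ (pvFlat r).map (·.1) := by
  constructor
  · intro h
    simp only [pvInRecord, Bool.and_eq_true] at h
    obtain ⟨h1, h2⟩ := h
    rw [PySem.Dict.contains_iff_mem_keys] at h1
    obtain ⟨⟨a, inner⟩, hmem, ha⟩ := List.mem_map.mp h1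
    have ha' : a = x := by simpa using ha
    subst ha'
    have hget : r.getD a PySem.Dict.empty = inner := PySem.Dict.getD_of_mem_items r hmem hnd _
    rw [hget, PySem.Dict.contains_iff_mem_keys] at h2
    obtain ⟨⟨b, v⟩, hbm, hb⟩ := List.mem_map.mp h2
    have hb' : b = y := by simpa using hb
    subst hb'
    exact List.mem_map.mpr ⟨((a, b), v), mem_pvFlat.mpr ⟨inner, hmem, hbm⟩, rfl⟩
  · intro h
    obtain ⟨⟨⟨a, b⟩, v⟩, hm, hab⟩ := List.mem_map.mp h
    have h1 : a = x := by simpa using congrArg Prod.fst hab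
    have h2 : b = y := by simpa using congrArg Prod.snd hab
    subst h1; subst h2
    obtain ⟨inner, hq, he⟩ := mem_pvFlat.mp hm
    simp only [pvInRecord, Bool.and_eq_true]
    constructor
    · rw [PySem.Dict.contains_iff_mem_keys]
      exact List.mem_map.mpr ⟨(a, inner), hq, rfl⟩
    · rw [PySem.Dict.getD_of_mem_items r hq hnd, PySem.Dict.contains_iff_mem_keys]
      exact List.mem_map.mpr ⟨(b, v), he, rfl⟩

lemma contains_eq {r : PySem.Dict Int (PySem.Dict Int (Option Int))} {l : PySem.Dict (Int × Int) (Option Int)} (hnd : r.keys.Nodup) (hfl : pvFlat r = l.items) (x y : Int) :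
    pvInRecord r x y = l.contains (x, y) := by
  have h1 := inRecord_iff hnd (r := r) x y
  rw [hfl] at h1
  rw [PySem.Dict.contains_eq_decide_mem_keys]
  by_cases h : (x, y) ∈ l.keys
  · simp only [h, decide_true]
    exact h1.mpr (by simpa [PySem.Dict.keys] using h)
  · simp only [h, decide_false]
    rw [← Bool.not_eq_true]
    intro hc
    exact h (by simpa [PySem.Dict.keys] using h1.mp hc)

lemma lookup_eq {r : PySem.Dict Int (PySem.Dict Int (Option Int))} {l : PySem.Dict (Int × Int) (Option Int)} (hnd : r.keys.Nodup) (hin : ∀ q ∈ r.items, q.2.keys.Nodup)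
    (hfl : pvFlat r = l.items) (hlnd : l.keys.Nodup) {x y : Int}
    (h : pvInRecord r x y = true) :
    (r.getD x PySem.Dict.empty).getD y none = l.getD (x, y) none := by
  simp only [pvInRecord, Bool.and_eq_true] at h
  obtain ⟨h1, h2⟩ := h
  rw [PySem.Dict.contains_iff_mem_keys] at h1
  obtain ⟨⟨a, inner⟩, hmem, ha⟩ := List.mem_map.mp h1
  have ha' : a = x := by simpa using ha
  subst ha'
  have hget : r.getD a PySem.Dict.empty = inner := PySem.Dict.getD_of_mem_items r hmem hnd _
  rw [hget] at h2 ⊢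
  rw [PySem.Dict.contains_iff_mem_keys] at h2
  obtain ⟨⟨b, v⟩, hbm, hb⟩ := List.mem_map.mp h2
  have hb' : b = y := by simpa using hb
  subst hb'
  rw [PySem.Dict.getD_of_mem_items inner hbm (hin _ hmem)]
  have : ((a, b), v) ∈ l.items := hfl ▸ mem_pvFlat.mpr ⟨inner, hmem, hbm⟩
  rw [PySem.Dict.getD_of_mem_items l this hlnd]

lemma flat_setv {r : PySem.Dict Int (PySem.Dict Int (Option Int))} (hnd : r.keys.Nodup)
    {x y : Int} (v : Option Int) (h : pvInRecord r x y = true) :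
    pvFlat (pvSetV r x y v) =
      (pvFlat r).map (fun e => if e.1 == (x, y) then ((x, y), v) else e) := by
  simp only [pvInRecord, Bool.and_eq_true] at h
  obtain ⟨hx, hy⟩ := h
  unfold pvSetV pvFlat
  rw [PySem.Dict.items_insert_of_contains r _ hx, List.flatMap_map, List.map_flatMap]
  refine List.flatMap_congr ?_
  rintro ⟨a, inner⟩ hq
  by_cases hax : a = x
  · subst hax
    have hget : r.getD a PySem.Dict.empty = inner := PySem.Dict.getD_of_mem_items r hq hnd _
    rw [hget] at hy ⊢
    simp only [BEq.rfl, if_pos]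
    rw [PySem.Dict.items_insert_of_contains inner _ hy, List.map_map, List.map_map]
    refine List.map_congr_left ?_
    rintro ⟨b, w⟩ hb
    by_cases hby : b = y
    · subst hby; simp
    · simp [hby, Prod.ext_iff]
  · have hne : (a == x) = false := by simp [hax]
    simp only [hne, Bool.false_eq_true, if_false]
    symm
    rw [List.map_map]
    refine List.map_congr_left ?_
    rintro ⟨b, w⟩ hb
    simp [Prod.ext_iff, hax]

lemma keys_setv {r : PySem.Dict Int (PySem.Dict Int (Option Int))}
    {x y : Int} (v : Option Int) (hx : r.contains x = true) :
    (pvSetV r x y v).keys = r.keys := by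
  unfold pvSetV
  simp only [PySem.Dict.keys]
  rw [PySem.Dict.items_insert_of_contains r _ hx, List.map_map]
  refine List.map_congr_left ?_
  rintro ⟨a, inner⟩ hq
  by_cases hax : a = x
  · subst hax; simp
  · simp [hax]

lemma inner_nodup_setv {r : PySem.Dict Int (PySem.Dict Int (Option Int))} (hnd : r.keys.Nodup)
    (hin : ∀ q ∈ r.items, q.2.keys.Nodup)
    {x y : Int} (v : Option Int) (hx : r.contains x = true) :
    ∀ q ∈ (pvSetV r x y v).items, q.2.keys.Nodup := by
  unfold pvSetV
  rw [PySem.Dict.items_insert_of_contains r _ hx]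
  intro q hq
  obtain ⟨q', hq', hqe⟩ := List.mem_map.mp hq
  by_cases hax : q'.1 = x
  · have : q = (x, (r.getD x PySem.Dict.empty).insert y v) := by
      simpa [hax] using hqe.symm
    subst this
    refine PySem.Dict.nodup_keys_insert _ _ _ ?_
    rw [PySem.Dict.contains_iff_mem_keys] at hx
    obtain ⟨⟨a, inner⟩, hmem, ha⟩ := List.mem_map.mp hx
    have ha' : a = x := by simpa using ha
    subst ha'
    rw [PySem.Dict.getD_of_mem_items r hmem hnd]
    exact hin _ hmem
  · have : q = q' := by simp [hax] at hqe; exact hqe.symm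
    subst this
    exact hin _ hq'

lemma fst_flat_setv {r : PySem.Dict Int (PySem.Dict Int (Option Int))} (hnd : r.keys.Nodup)
    {x y : Int} (v : Option Int) (h : pvInRecord r x y = true) :
    (pvFlat (pvSetV r x y v)).map (·.1) = (pvFlat r).map (·.1) := by
  rw [flat_setv hnd v h, List.map_map]
  refine List.map_congr_left ?_
  intro e he
  by_cases hc : e.1 = (x, y)
  · simp [hc]
  · simp [hc]

lemma setv_sim {r : PySem.Dict Int (PySem.Dict Int (Option Int))}
    {l : PySem.Dict (Int × Int) (Option Int)} (hnd : r.keys.Nodup)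
    (hfl : pvFlat r = l.items) {x y : Int} (v : Option Int)
    (h : pvInRecord r x y = true) :
    pvFlat (pvSetV r x y v) = (l.insert (x, y) v).items := by
  rw [flat_setv hnd v h]
  have hc : l.contains (x, y) = true := by rw [← contains_eq hnd hfl]; exact h
  rw [PySem.Dict.items_insert_of_contains l _ hc, hfl]

lemma assign_fold : ∀ (cs : List (Int × Int)) (r : PySem.Dict Int (PySem.Dict Int (Option Int)))
    (l : PySem.Dict (Int × Int) (Option Int)) (v : Option Int),
    r.keys.Nodup → (∀ q ∈ r.items, q.2.keys.Nodup) → pvFlat r = l.items → l.keys.Nodup →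
    (∀ c ∈ cs, c ∈ (pvFlat r).map (·.1)) →
    pvFlat (cs.foldl (fun r c => pvSetV r c.1 c.2 v) r) =
        ((cs.foldl (fun l c => l.insert c v) l)).items ∧
    (cs.foldl (fun r c => pvSetV r c.1 c.2 v) r).keys.Nodup ∧
    (∀ q ∈ (cs.foldl (fun r c => pvSetV r c.1 c.2 v) r).items, q.2.keys.Nodup) ∧
    (cs.foldl (fun l c => l.insert c v) l).keys.Nodup ∧
    (pvFlat (cs.foldl (fun r c => pvSetV r c.1 c.2 v) r)).map (·.1) = (pvFlat r).map (·.1)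
  | [], r, l, v => by
    intro h1 h2 h3 h4 h5
    exact ⟨h3, h1, h2, h4, rfl⟩
  | c :: cs, r, l, v => by
    intro h1 h2 h3 h4 h5
    have hcm : c ∈ (pvFlat r).map (·.1) := h5 c (by simp)
    have hrec : pvInRecord r c.1 c.2 = true := (inRecord_iff h1 c.1 c.2).mpr hcm
    have hcx : r.contains c.1 = true := by
      simp only [pvInRecord, Bool.and_eq_true] at hrec; exact hrec.1
    simp only [List.foldl_cons]
    have ih := assign_fold cs (pvSetV r c.1 c.2 v) (l.insert c v) v
      (by rw [keys_setv v hcx]; exact h1)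
      (inner_nodup_setv h1 h2 v hcx)
      (by rw [setv_sim h1 h3 v hrec])
      (PySem.Dict.nodup_keys_insert _ _ _ h4)
      (by intro d hd; rw [fst_flat_setv h1 v hrec]; exact h5 d (by simp [hd]))
    refine ⟨ih.1, ih.2.1, ih.2.2.1, ih.2.2.2.1, ?_⟩
    rw [ih.2.2.2.2, fst_flat_setv h1 v hrec]

lemma map_filter_eq_filterMap {α β : Type} (L : List α) (co : α → β) (fl : β → Bool) :
    ((L.map (fun o => (co o, fl (co o)))).filter (fun q => q.2)).map (fun q => q.1)
      = L.filterMap (fun o => if fl (co o) then some (co o) else none) := by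
  induction L with
  | nil => simp
  | cons a t ih =>
    simp only [List.map_cons, List.filter_cons, List.filterMap_cons]
    by_cases h : fl (co a)
    · simp only [h, if_true, List.map_cons, ih]
    · simp only [h, Bool.false_eq_true, if_false, ih]

lemma findAdjacents_eq {r : PySem.Dict Int (PySem.Dict Int (Option Int))}
    {l : PySem.Dict (Int × Int) (Option Int)} (hnd : r.keys.Nodup)
    (hfl : pvFlat r = l.items) (x y : Int) :
    pvFindAdjacents r x y = pvOffsets.filterMap (fun o =>
      if l.contains (x + o.1, y + o.2) then some (x + o.1, y + o.2) else none) := by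
  unfold pvFindAdjacents
  dsimp only
  refine Eq.trans (PySem.List.foldl_append_if (fun q : (Int × Int) × Bool => q.2) (fun q : (Int × Int) × Bool => q.1) _ _) ?_
  have hcheck :
      ([((x - 1, y - 1), pvInRecord r (x - 1) (y - 1)),
        ((x + 1, y + 1), pvInRecord r (x + 1) (y + 1)),
        ((x - 1, y + 1), pvInRecord r (x - 1) (y + 1)),
        ((x + 1, y - 1), pvInRecord r (x + 1) (y - 1)),
        ((x - 1, y), pvInRecord r (x - 1) y),
        ((x + 1, y), pvInRecord r (x + 1) y),
        ((x, y - 1), pvInRecord r x (y - 1)),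
        ((x, y - 1), pvInRecord r x (y - 1))] : List ((Int × Int) × Bool))
      = pvOffsets.map (fun o => ((x + o.1, y + o.2), l.contains (x + o.1, y + o.2))) := by
    simp only [pvOffsets, List.map_cons, List.map_nil]
    norm_num [← contains_eq hnd hfl, sub_eq_add_neg]
  rw [hcheck, map_filter_eq_filterMap pvOffsets (fun o => (x + o.1, y + o.2)) (fun c => l.contains c)]
  simp

lemma getGroup_eq {r : PySem.Dict Int (PySem.Dict Int (Option Int))}
    {l : PySem.Dict (Int × Int) (Option Int)} (hnd : r.keys.Nodup)
    (hin : ∀ q ∈ r.items, q.2.keys.Nodup) (hfl : pvFlat r = l.items) (hlnd : l.keys.Nodup) :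
    ∀ cs : List (Int × Int), (∀ c ∈ cs, pvInRecord r c.1 c.2 = true) →
      pvGetGroup r cs = pvFirstGroup l cs
  | [], _ => rfl
  | c :: cs, h => by
    have h1 := lookup_eq hnd hin hfl hlnd (h c (by simp))
    unfold pvGetGroup pvFirstGroup
    rw [← h1]
    cases (r.getD c.1 PySem.Dict.empty).getD c.2 none with
    | some g => rfl
    | none => simpa using getGroup_eq hnd hin hfl hlnd cs (fun d hd => h d (by simp [hd]))

lemma label_sim : ∀ (rest : List (Int × Int)) (r : PySem.Dict Int (PySem.Dict Int (Option Int)))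
    (l : PySem.Dict (Int × Int) (Option Int)) (g : Int),
    r.keys.Nodup → (∀ q ∈ r.items, q.2.keys.Nodup) → pvFlat r = l.items → l.keys.Nodup →
    (∀ p ∈ rest, p ∈ (pvFlat r).map (·.1)) →
    pvFlat (rest.foldl pvStepA (r, g)).1 = ((rest.foldl pvStepB (l, g)).1).items ∧
    (rest.foldl pvStepA (r, g)).2 = (rest.foldl pvStepB (l, g)).2
  | [], r, l, g => fun _ _ h3 _ _ => ⟨h3, rfl⟩
  | p :: rest, r, l, g => by
    intro h1 h2 h3 h4 h5
    have hpm : p ∈ (pvFlat r).map (·.1) := h5 p (by simp)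
    have hprec : pvInRecord r p.1 p.2 = true := (inRecord_iff h1 p.1 p.2).mpr hpm
    have hpcx : r.contains p.1 = true := by
      simp only [pvInRecord, Bool.and_eq_true] at hprec; exact hprec.1
    have hcells := findAdjacents_eq h1 h3 p.1 p.2
    have hmemk : ∀ c ∈ pvFindAdjacents r p.1 p.2, c ∈ (pvFlat r).map (·.1) := by
      rw [hcells]
      intro c hc
      obtain ⟨o, _, hoc⟩ := List.mem_filterMap.mp hc
      by_cases hco : l.contains (p.1 + o.1, p.2 + o.2) = true
      · rw [if_pos hco] at hoc
        have hc' : c = (p.1 + o.1, p.2 + o.2) := by simpa using hoc.symm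
        subst hc'
        rw [PySem.Dict.contains_iff_mem_keys] at hco
        simpa [PySem.Dict.keys, ← h3] using hco
      · rw [if_neg hco] at hoc; cases hoc
    have hrecflags : ∀ c ∈ pvFindAdjacents r p.1 p.2, pvInRecord r c.1 c.2 = true :=
      fun c hc => (inRecord_iff h1 c.1 c.2).mpr (hmemk c hc)
    simp only [List.foldl_cons]
    have hstep : ∃ r' l' g', pvStepA (r, g) p = (r', g') ∧ pvStepB (l, g) p = (l', g') ∧
        r'.keys.Nodup ∧ (∀ q ∈ r'.items, q.2.keys.Nodup) ∧ pvFlat r' = l'.items ∧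
        l'.keys.Nodup ∧ (pvFlat r').map (·.1) = (pvFlat r).map (·.1) := by
      unfold pvStepA pvStepB
      dsimp only
      rw [← hcells, ← getGroup_eq h1 h2 h3 h4 _ hrecflags]
      by_cases hlen : (pvFindAdjacents r p.1 p.2).length = 0
      · have hempty : (pvFindAdjacents r p.1 p.2).isEmpty = true := by
          simpa [List.isEmpty_iff, List.length_eq_zero_iff] using hlen
        rw [if_pos hlen, if_pos hempty]
        exact ⟨_, _, _, rfl, rfl,
          (by rw [keys_setv _ hpcx]; exact h1),
          inner_nodup_setv h1 h2 _ hpcx,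
          setv_sim h1 h3 _ hprec,
          PySem.Dict.nodup_keys_insert _ _ _ h4,
          fst_flat_setv h1 _ hprec⟩
      · have hempty : (pvFindAdjacents r p.1 p.2).isEmpty = false := by
          simpa [List.isEmpty_iff, List.length_eq_zero_iff, ← ne_eq] using hlen
        rw [if_neg hlen, hempty]
        simp only [Bool.false_eq_true, if_false]
        have hmain : ∀ v : Int,
            pvFlat ((pvFindAdjacents r p.1 p.2).foldl
                (fun r c => pvSetV r c.1 c.2 (some v)) (pvSetV r p.1 p.2 (some v))) =
              ((pvFindAdjacents r p.1 p.2).foldl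
                (fun l c => l.insert c (some v)) (l.insert p (some v))).items ∧
            ((pvFindAdjacents r p.1 p.2).foldl
                (fun r c => pvSetV r c.1 c.2 (some v)) (pvSetV r p.1 p.2 (some v))).keys.Nodup ∧
            (∀ q ∈ ((pvFindAdjacents r p.1 p.2).foldl
                (fun r c => pvSetV r c.1 c.2 (some v)) (pvSetV r p.1 p.2 (some v))).items,
              q.2.keys.Nodup) ∧
            ((pvFindAdjacents r p.1 p.2).foldl
                (fun l c => l.insert c (some v)) (l.insert p (some v))).keys.Nodup ∧
            (pvFlat ((pvFindAdjacents r p.1 p.2).foldl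
                (fun r c => pvSetV r c.1 c.2 (some v)) (pvSetV r p.1 p.2 (some v)))).map (·.1) =
              (pvFlat r).map (·.1) := by
          intro v
          have hres := assign_fold (pvFindAdjacents r p.1 p.2) (pvSetV r p.1 p.2 (some v))
            (l.insert p (some v)) (some v)
            (by rw [keys_setv _ hpcx]; exact h1)
            (inner_nodup_setv h1 h2 _ hpcx)
            (setv_sim h1 h3 _ hprec)
            (PySem.Dict.nodup_keys_insert _ _ _ h4)
            (by intro c hc; rw [fst_flat_setv h1 _ hprec]; exact hmemk c hc)
          exact ⟨hres.1, hres.2.1, hres.2.2.1, hres.2.2.2.1,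
            by rw [hres.2.2.2.2, fst_flat_setv h1 _ hprec]⟩
        cases hg : pvGetGroup r (pvFindAdjacents r p.1 p.2) with
        | none =>
          obtain ⟨c1, c2, c3, c4, c5⟩ := hmain g
          exact ⟨_, _, _, rfl, rfl, c2, c3, c1, c4, c5⟩
        | some g0 =>
          obtain ⟨c1, c2, c3, c4, c5⟩ := hmain g0
          exact ⟨_, _, _, rfl, rfl, c2, c3, c1, c4, c5⟩
    obtain ⟨r', l', g', hA, hB, n1, n2, n3, n4, n5⟩ := hstep
    rw [hA, hB]
    exact label_sim rest r' l' g' n1 n2 n3 n4 (fun q hq => by rw [n5]; exact h5 q (by simp [hq]))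

lemma lexle_fst_le {a b : Int × Int} (h : (toLex a : Lex (Int × Int)) ≤ toLex b) : a.1 ≤ b.1 := by
  rcases Prod.Lex.le_iff.mp h with h1 | ⟨h1, _⟩
  · exact le_of_lt h1
  · exact le_of_eq h1

lemma list_last_of_ub {β : Type} (x : Int) : ∀ (L : List (Int × β)),
    (L.map (·.1)).Pairwise (· < ·) → x ∈ L.map (·.1) → (∀ k ∈ L.map (·.1), k ≤ x) →
    ∃ pre inner, L = pre ++ [(x, inner)] ∧ x ∉ pre.map (·.1)
  | [], _, hx, _ => by simp at hx
  | q :: t, hpw, hx, hub => by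
    rw [List.map_cons] at hpw hx hub
    obtain ⟨hq, hpwt⟩ := List.pairwise_cons.mp hpw
    rcases t with _ | ⟨q2, t2⟩
    · have hxq : x = q.1 := by simpa using hx
      exact ⟨[], q.2, by simp [hxq], by simp⟩
    · have hq2x : q2.1 ≤ x := hub q2.1 (by simp)
      have hqq2 : q.1 < q2.1 := hq q2.1 (by simp)
      have hxin : x ∈ (q2 :: t2).map (·.1) := by
        rcases List.mem_cons.mp hx with h | h
        · exact absurd h (by omega)
        · exact h
      obtain ⟨pre, inner, hdec, hnm⟩ := list_last_of_ub x (q2 :: t2) hpwt hxin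
        (fun k hk => hub k (List.mem_cons_of_mem _ hk))
      have hq1x : q.1 < x := by
        obtain ⟨c, hc, hcx⟩ := List.mem_map.mp hxin
        have := hq c.1 (List.mem_map.mpr ⟨c, hc, rfl⟩)
        omega
      refine ⟨q :: pre, inner, by simp [hdec], ?_⟩
      simp only [List.map_cons, List.mem_cons]
      rintro (h | h)
      · omega
      · exact hnm h

lemma build_sim : ∀ (rest : List (Int × Int)) (r : PySem.Dict Int (PySem.Dict Int (Option Int)))
    (l : PySem.Dict (Int × Int) (Option Int)),
    rest.Pairwise (fun a b => (toLex a : Lex (Int × Int)) ≤ toLex b) →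
    pvFlat r = l.items → r.keys.Pairwise (· < ·) → (∀ q ∈ r.items, q.2.keys.Nodup) →
    l.keys.Nodup → (∀ k ∈ r.keys, ∀ p ∈ rest, k ≤ p.1) →
    pvFlat (rest.foldl pvBuildStepA r) = ((rest.foldl (fun l c => l.insert c none) l)).items ∧
    (rest.foldl pvBuildStepA r).keys.Pairwise (· < ·) ∧
    (∀ q ∈ (rest.foldl pvBuildStepA r).items, q.2.keys.Nodup) ∧
    (rest.foldl (fun l c => l.insert c none) l).keys.Nodup ∧
    (∀ p ∈ rest, p ∈ (pvFlat (rest.foldl pvBuildStepA r)).map (·.1)) ∧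
    (∀ k ∈ (pvFlat r).map (·.1), k ∈ (pvFlat (rest.foldl pvBuildStepA r)).map (·.1))
  | [], r, l => fun _ h3 hpk hin hlnd _ => ⟨h3, hpk, hin, hlnd, by simp, fun k hk => hk⟩
  | p :: rest, r, l => by
    intro hsort h3 hpk hin hlnd hub
    have hnd : r.keys.Nodup := hpk.imp (fun h => ne_of_lt h)
    have hsort' : rest.Pairwise (fun a b => (toLex a : Lex (Int × Int)) ≤ toLex b) :=
      (List.pairwise_cons.mp hsort).2
    have hheadle : ∀ p' ∈ rest, p.1 ≤ p'.1 :=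
      fun p' hp' => lexle_fst_le ((List.pairwise_cons.mp hsort).1 p' hp')
    simp only [List.foldl_cons]
    have hstep : ∃ r' l', pvBuildStepA r p = r' ∧ l.insert p none = l' ∧
        pvFlat r' = l'.items ∧ r'.keys.Pairwise (· < ·) ∧
        (∀ q ∈ r'.items, q.2.keys.Nodup) ∧ l'.keys.Nodup ∧
        (∀ k ∈ r'.keys, ∀ p' ∈ rest, k ≤ p'.1) ∧
        p ∈ (pvFlat r').map (·.1) ∧
        (∀ k ∈ (pvFlat r).map (·.1), k ∈ (pvFlat r').map (·.1)) := by
      unfold pvBuildStepA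
      by_cases hcx : r.contains p.1 = true
      · rw [if_pos hcx]
        by_cases hcy : (r.getD p.1 PySem.Dict.empty).contains p.2 = true
        · -- in-place overwrite: this is exactly pvSetV
          have hrec : pvInRecord r p.1 p.2 = true := by
            simp only [pvInRecord, Bool.and_eq_true]; exact ⟨hcx, hcy⟩
          rw [show (r.insert p.1 ((r.getD p.1 PySem.Dict.empty).insert p.2 none))
              = pvSetV r p.1 p.2 none from rfl]
          refine ⟨_, _, rfl, rfl, setv_sim hnd h3 none hrec,
            (by rw [keys_setv none hcx]; exact hpk),
            inner_nodup_setv hnd hin none hcx,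
            PySem.Dict.nodup_keys_insert _ _ _ hlnd,
            (by rw [keys_setv none hcx]; exact fun k hk p' hp' => hub k hk p' (by simp [hp'])),
            (by rw [fst_flat_setv hnd none hrec]; exact (inRecord_iff hnd p.1 p.2).mp hrec),
            (by rw [fst_flat_setv hnd none hrec]; exact fun k hk => hk)⟩
        · -- x present, y new: appends at the end of the last block
          have hub' : ∀ k ∈ r.keys, k ≤ p.1 := fun k hk => hub k hk p (by simp)
          obtain ⟨pre, inner, hdec, hnm⟩ := list_last_of_ub p.1 r.items
            (by simpa [PySem.Dict.keys] using hpk)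
            (by simpa [PySem.Dict.keys] using (PySem.Dict.contains_iff_mem_keys r p.1).mp hcx)
            (by simpa [PySem.Dict.keys] using hub')
          have hmemx : (p.1, inner) ∈ r.items := by rw [hdec]; simp
          have hget : r.getD p.1 PySem.Dict.empty = inner :=
            PySem.Dict.getD_of_mem_items r hmemx hnd _
          rw [hget] at hcy
          have hcy' : inner.contains p.2 = false := by simpa using hcy
          have hrecF : pvInRecord r p.1 p.2 = false := by
            simp only [pvInRecord, hget, hcy', Bool.and_false]
          have hlc : l.contains p =
              false := by rw [← contains_eq hnd h3]; exact hrecF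
          have hitems : (r.insert p.1 ((r.getD p.1 PySem.Dict.empty).insert p.2 none)).items
              = pre ++ [(p.1, inner.insert p.2 none)] := by
            rw [PySem.Dict.items_insert_of_contains r _ hcx, hdec, List.map_append]
            congr 1
            · refine (List.map_congr_left ?_).trans (List.map_id _)
              intro q hq
              have : (q.1 == p.1) = false := by
                have : q.1 ≠ p.1 := fun hq1 => hnm (List.mem_map.mpr ⟨q, hq, hq1⟩)
                simp [this]
              simp [this]
            · simp [hget]
          have hflat' : pvFlat (r.insert p.1 ((r.getD p.1 PySem.Dict.empty).insert p.2 none))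
              = pvFlat r ++ [((p.1, p.2), none)] := by
            unfold pvFlat
            rw [hitems, hdec, List.flatMap_append, List.flatMap_append]
            simp only [List.flatMap_cons, List.flatMap_nil, List.append_nil]
            rw [PySem.Dict.items_insert_of_not_contains inner _ hcy']
            simp [List.append_assoc]
          have hkeys' : (r.insert p.1 ((r.getD p.1 PySem.Dict.empty).insert p.2 none)).keys
              = r.keys := by
            simp only [PySem.Dict.keys, hitems, hdec, List.map_append]
            rfl
          refine ⟨_, _, rfl, rfl, ?_, ?_, ?_, PySem.Dict.nodup_keys_insert _ _ _ hlnd, ?_, ?_, ?_⟩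
          · rw [hflat', PySem.Dict.items_insert_of_not_contains l _ hlc, h3]
          · rw [hkeys']; exact hpk
          · rw [hitems]
            intro q hq
            rcases List.mem_append.mp hq with h | h
            · exact hin q (by rw [hdec]; exact List.mem_append.mpr (Or.inl h))
            · have : q = (p.1, inner.insert p.2 none) := by simpa using h
              subst this
              exact PySem.Dict.nodup_keys_insert _ _ _ (hin _ hmemx)
          · rw [hkeys']; exact fun k hk p' hp' => hub k hk p' (by simp [hp'])
          · rw [hflat']; simp
          · rw [hflat']; intro k hk; simp only [List.map_append]; exact List.mem_append.mpr (Or.inl hk)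
      · -- x fresh: new block appended
        have hcx' : r.contains p.1 = false := by simpa using hcx
        rw [if_neg hcx]
        have hrecF : pvInRecord r p.1 p.2 = false := by
          simp only [pvInRecord, hcx', Bool.false_and]
        have hlc : l.contains p = false := by rw [← contains_eq hnd h3]; exact hrecF
        have hblock : (PySem.Dict.empty.insert p.2 (none : Option Int)).items = [(p.2, none)] := by
          rw [PySem.Dict.items_insert_of_not_contains _ _ (by rfl)]
          rfl
        have hflat' : pvFlat (r.insert p.1 (PySem.Dict.empty.insert p.2 none))
            = pvFlat r ++ [((p.1, p.2), none)] := by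
          unfold pvFlat
          rw [PySem.Dict.items_insert_of_not_contains r _ hcx', List.flatMap_append]
          simp [hblock]
        have hkeys' : (r.insert p.1 (PySem.Dict.empty.insert p.2 none)).keys = r.keys ++ [p.1] :=
          PySem.Dict.keys_insert_of_not_contains r _ hcx'
        have hxnot : p.1 ∉ r.keys := fun hk =>
          (by rw [(PySem.Dict.contains_iff_mem_keys r p.1).mpr hk] at hcx'; cases hcx')
        refine ⟨_, _, rfl, rfl, ?_, ?_, ?_, PySem.Dict.nodup_keys_insert _ _ _ hlnd, ?_, ?_, ?_⟩
        · rw [hflat', PySem.Dict.items_insert_of_not_contains l _ hlc, h3]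
        · rw [hkeys']
          refine List.pairwise_append.mpr ⟨hpk, by simp, ?_⟩
          intro k hk k' hk'
          have h1 : k ≤ p.1 := hub k hk p (by simp)
          have h2 : k' = p.1 := by simpa using hk'
          have h3 : k ≠ p.1 := fun he => hxnot (he ▸ hk)
          omega
        · rw [PySem.Dict.items_insert_of_not_contains r _ hcx']
          intro q hq
          rcases List.mem_append.mp hq with h | h
          · exact hin q h
          · have : q = (p.1, PySem.Dict.empty.insert p.2 none) := by simpa using h
            subst this
            simp only [PySem.Dict.keys, hblock]
            simp
        · rw [hkeys']
          intro k hk p' hp'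
          rcases List.mem_append.mp hk with h | h
          · exact hub k h p' (by simp [hp'])
          · have : k = p.1 := by simpa using h
            subst this
            exact hheadle p' hp'
        · rw [hflat']; simp
        · rw [hflat']; intro k hk; simp only [List.map_append]; exact List.mem_append.mpr (Or.inl hk)
    obtain ⟨r', l', hA, hB, c1, c2, c3, c4, c5, c6, c7⟩ := hstep
    rw [hA, hB]
    obtain ⟨d1, d2, d3, d4, d5, d6⟩ := build_sim rest r' l' hsort' c1 c2 c3 c4 c5
    refine ⟨d1, d2, d3, d4, ?_, ?_⟩
    · intro q hq
      rcases List.mem_cons.mp hq with h | h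
      · subst h; exact d6 _ c6
      · exact d5 q h
    · exact fun k hk => d6 k (c7 k hk)

lemma filter_flatMap {α β : Type} (L : List α) (g : α → List β) (p : β → Bool) :
    (L.flatMap g).filter p = L.flatMap (fun a => (g a).filter p) := by
  induction L with
  | nil => rfl
  | cons a t ih => simp [List.flatMap_cons, List.filter_append, ih]

lemma outA_scan (r : PySem.Dict Int (PySem.Dict Int (Option Int))) (i : Int) :
    r.items.foldl (fun acc q => q.2.items.foldl
        (fun acc2 e => if e.2 == some i then acc2 ++ [(q.1, e.1)] else acc2) acc) []
      = ((pvFlat r).filter (fun e => e.2 == some i)).map (fun e => e.1) := by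
  have hinner : ∀ (q : Int × PySem.Dict Int (Option Int)) (acc : List (Int × Int)),
      q.2.items.foldl (fun acc2 e => if e.2 == some i then acc2 ++ [(q.1, e.1)] else acc2) acc
        = acc ++ ((q.2.items.filter (fun e => e.2 == some i)).map (fun e => (q.1, e.1))) := by
    intro q acc
    exact PySem.List.foldl_append_if (fun e : Int × Option Int => e.2 == some i)
      (fun e : Int × Option Int => (q.1, e.1)) _ _
  calc r.items.foldl (fun acc q => q.2.items.foldl
        (fun acc2 e => if e.2 == some i then acc2 ++ [(q.1, e.1)] else acc2) acc) []
      = r.items.foldl (fun acc q =>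
          acc ++ ((q.2.items.filter (fun e => e.2 == some i)).map (fun e => (q.1, e.1)))) [] := by
        exact PySem.List.foldl_congr_mem _ _ _ _ (fun acc q _ => hinner q acc)
    _ = ((pvFlat r).filter (fun e => e.2 == some i)).map (fun e => e.1) := by
        rw [PySem.List.foldl_append_eq_flatMap]
        unfold pvFlat
        rw [filter_flatMap, List.map_flatMap, List.nil_append]
        refine List.flatMap_congr ?_
        intro q _
        rw [List.filter_map, List.map_map]
        rfl

lemma foldl_modify_swap (L : List ((Int × Int) × Option Int))
    (d : PySem.Dict (Option Int) (List (Int × Int))) :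
    L.foldl (fun b q => b.modify q.2 [] (· ++ [q.1])) d
      = (L.map (fun q => (q.2, q.1))).foldl (fun d p => d.modify p.1 [] (· ++ [p.2])) d := by
  induction L generalizing d with
  | nil => rfl
  | cons a t ih => simp only [List.foldl_cons, List.map_cons, ih]

lemma buckets_getD (L : List ((Int × Int) × Option Int)) (i : Int) :
    (L.foldl (fun b q => b.modify q.2 [] (· ++ [q.1])) PySem.Dict.empty).getD (some i) []
      = (L.filter (fun q => q.2 == some i)).map (fun q => q.1) := by
  rw [foldl_modify_swap, PySem.Dict.getD_foldl_modify_append]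
  rw [List.filter_map, List.map_map]
  simp [PySem.Dict.getD_empty, Function.comp_def]

lemma buckets_contains (L : List ((Int × Int) × Option Int)) (i : Int) :
    (L.foldl (fun b q => b.modify q.2 [] (· ++ [q.1])) PySem.Dict.empty).contains (some i) = true
      ↔ some i ∈ L.map (fun q => q.2) := by
  rw [PySem.Dict.contains_iff_mem_keys,
    PySem.Dict.keys_foldl_modify_key L (fun q => q.2) [] (fun b q => (· ++ [q.1]))]
  rw [PySem.Dict.keys_empty]
  exact (PySem.Set.mem_update _ _ _).trans (by simp)

-- outA_scan restated through pvScanA (definitional)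
lemma pvScanA_eq (r : PySem.Dict Int (PySem.Dict Int (Option Int))) (i : Int) :
    pvScanA r i = ((pvFlat r).filter (fun e => e.2 == some i)).map (fun e => e.1) :=
  outA_scan r i

-- ===== VERDICT (by name: the statement is the Claim_ definition above) =====
theorem separete_spec : Claim_equal_separete := by
  unfold Claim_equal_separete
  intro data _
  unfold Spec_separete separete separete_alt
  dsimp only
  have hsorted : (PySem.List.sorted data (fun p => toLex p) false).Pairwise
      (fun a b => (toLex a : Lex (Int × Int)) ≤ toLex b) :=
    PySem.List.sorted_pairwise data (fun p => toLex p)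
  obtain ⟨h3, hpk, hin, hlnd, hmem, -⟩ := build_sim (PySem.List.sorted data (fun p => toLex p) false)
    PySem.Dict.empty PySem.Dict.empty hsorted rfl
    (by rw [PySem.Dict.keys_empty]; exact List.Pairwise.nil)
    (by intro q hq
        rw [show (PySem.Dict.empty : PySem.Dict Int (PySem.Dict Int (Option Int))).items = []
          from rfl] at hq
        cases hq)
    (by rw [PySem.Dict.keys_empty]; exact List.nodup_nil)
    (by rw [PySem.Dict.keys_empty]; intro k hk; cases hk)
  obtain ⟨hfl2, hgid⟩ := label_sim (PySem.List.sorted data (fun p => toLex p) false) _ _ 0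
    (hpk.imp (fun h => ne_of_lt h)) hin h3 hlnd hmem
  rw [← hgid]
  rw [show ((PySem.List.sorted data (fun p => toLex p) false).foldl pvStepA
      ((PySem.List.sorted data (fun p => toLex p) false).foldl pvBuildStepA PySem.Dict.empty, 0)).2
    = ((PySem.List.sorted data (fun p => toLex p) false).foldl pvStepA
      ((PySem.List.sorted data (fun p => toLex p) false).foldl pvBuildStepA PySem.Dict.empty, 0)).2 from rfl]
  -- abbreviations
  generalize hstA : (PySem.List.sorted data (fun p => toLex p) false).foldl pvStepA
      ((PySem.List.sorted data (fun p => toLex p) false).foldl pvBuildStepA PySem.Dict.empty, 0) = stA at *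
  generalize hstB : (PySem.List.sorted data (fun p => toLex p) false).foldl pvStepB
      ((PySem.List.sorted data (fun p => toLex p) false).foldl
        (fun l c => l.insert c (none : Option Int)) PySem.Dict.empty, 0) = stB at *
  have hA1 := PySem.List.foldl_append_singleton_eq_map (pvScanA stA.1)
    (PySem.List.pyRange 0 stA.2 1) []
  rw [List.nil_append] at hA1
  rw [hA1]
  have hB1 := PySem.List.foldl_append_if
    (fun i : Int => (stB.1.items.foldl (fun b q => b.modify q.2 [] (· ++ [q.1]))
      PySem.Dict.empty).contains (some i))
    (fun i : Int => (stB.1.items.foldl (fun b q => b.modify q.2 [] (· ++ [q.1]))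
      PySem.Dict.empty).getD (some i) [])
    (PySem.List.pyRange 0 stA.2 1) []
  rw [List.nil_append] at hB1
  rw [hB1, List.filter_map]
  have hscan : ∀ i : Int, pvScanA stA.1 i
      = (stB.1.items.foldl (fun b q => b.modify q.2 [] (· ++ [q.1])) PySem.Dict.empty).getD
          (some i) [] := by
    intro i
    rw [pvScanA_eq, hfl2, buckets_getD]
  have hpred : ∀ i : Int, ((fun g : List (Int × Int) => g.length != 0) ∘ pvScanA stA.1) i
      = (stB.1.items.foldl (fun b q => b.modify q.2 [] (· ++ [q.1])) PySem.Dict.empty).contains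
          (some i) := by
    intro i
    have hs := hscan i
    by_cases hc : (stB.1.items.foldl (fun b q => b.modify q.2 [] (· ++ [q.1]))
        PySem.Dict.empty).contains (some i) = true
    · rw [hc]
      have hmemv := (buckets_contains stB.1.items i).mp hc
      obtain ⟨q, hq, hq2⟩ := List.mem_map.mp hmemv
      have hne : (stB.1.items.filter (fun q => q.2 == some i)).map (fun q => q.1) ≠ [] := by
        simp only [ne_eq, List.map_eq_nil_iff, List.filter_eq_nil_iff]
        push Not
        exact ⟨q, hq, by simp [hq2]⟩
      simp only [Function.comp_apply, hs, buckets_getD]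
      simpa [bne_iff_ne, List.length_eq_zero_iff] using hne
    · have hc' : (stB.1.items.foldl (fun b q => b.modify q.2 [] (· ++ [q.1]))
          PySem.Dict.empty).contains (some i) = false := by simpa using hc
      rw [hc']
      have hnm : some i ∉ stB.1.items.map (fun q => q.2) :=
        fun hm => hc ((buckets_contains stB.1.items i).mpr hm)
      have hnil : (stB.1.items.filter (fun q => q.2 == some i)) = [] := by
        rw [List.filter_eq_nil_iff]
        intro q hq
        simp only [beq_iff_eq]
        exact fun he => hnm (List.mem_map.mpr ⟨q, hq, he⟩)
      simp only [Function.comp_apply, hs, buckets_getD, hnil]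
      simp
  rw [List.filter_congr (fun i _ => hpred i)]
  exact List.map_congr_left (fun i _ => hscan i)
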